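-- pv_equiv track=rewrite | github.com/cleangun/Baekjoon_CondingTest | python_silver5_1308.py | get_1000_year
-- ===== SOURCE A (Python) =====
-- def get_1000_year(start_year):
--   result = 0
--   for year in range(start_year, start_year + 1000):
--     if year % 400 == 0:
--       result += 366
--     elif year % 100 == 0:
--       result += 365
--     elif year % 4 == 0:
--       result += 366
--     else:
--       result += 365
--   return result
-- ===== SOURCE B (Python) =====
-- def get_1000_year(start_year):
--   def count(d):
--     return (start_year + 999) // d - (start_year - 1) // d
--   return 365000 + count(4) - count(100) + count(400)
-- ===== Notes on version B (the rewrite author's own statement) =====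
-- stated objective: faster
-- what changed: Replaced the fixed thousand-iteration year-by-year loop with a constant-time closed form: the base day count plus the leap-year count on the span computed by inclusion-exclusion over the leap-year divisors via floor division.
import Mathlib
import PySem

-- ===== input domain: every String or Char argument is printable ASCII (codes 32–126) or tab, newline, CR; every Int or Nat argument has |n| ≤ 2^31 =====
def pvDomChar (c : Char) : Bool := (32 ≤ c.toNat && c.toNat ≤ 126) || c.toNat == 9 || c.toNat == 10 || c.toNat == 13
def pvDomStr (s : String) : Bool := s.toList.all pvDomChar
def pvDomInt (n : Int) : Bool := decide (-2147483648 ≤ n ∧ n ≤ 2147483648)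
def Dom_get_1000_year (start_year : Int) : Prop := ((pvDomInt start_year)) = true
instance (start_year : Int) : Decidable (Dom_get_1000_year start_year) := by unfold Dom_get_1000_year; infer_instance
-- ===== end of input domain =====

-- B replaces A's 1000-iteration loop by a constant-time inclusion-exclusion formula (objective: faster).

-- ===== PORT A =====
def get_1000_year (start_year : Int) : Int :=
  (PySem.List.pyRange start_year (start_year + 1000) 1).foldl
    (fun result year =>
      if PySem.Int.mod year 400 = 0 then result + 366
      else if PySem.Int.mod year 100 = 0 then result + 365
      else if PySem.Int.mod year 4 = 0 then result + 366
      else result + 365) 0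

-- ===== PORT B =====
-- count d = number of multiples of d in [start_year, start_year + 1000)
def pvCount (start_year d : Int) : Int :=
  PySem.Int.floordiv (start_year + 999) d - PySem.Int.floordiv (start_year - 1) d

def get_1000_year_alt (start_year : Int) : Int :=
  365000 + pvCount start_year 4 - pvCount start_year 100 + pvCount start_year 400

-- ===== PRECONDITION & SPEC =====
def Spec_get_1000_year (start_year : Int) (out : Int) : Prop := out = get_1000_year_alt start_year
instance (start_year : Int) (out : Int) : Decidable (Spec_get_1000_year start_year out) := by unfold Spec_get_1000_year; infer_instance

-- ===== CLAIM (what is proved, stated in full; the proofs are below) =====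
def Claim_equal_get_1000_year : Prop := ∀ (start_year : Int), Dom_get_1000_year start_year → Spec_get_1000_year start_year (get_1000_year start_year)

-- ===== LEMMAS AND PROOFS =====

-- the loop over [a, a+n) equals 365*n plus inclusion-exclusion counts of multiples
theorem pvLoop_closed (a : Int) (n : Nat) :
    (PySem.List.pyRange a (a + n) 1).foldl
      (fun result year =>
        if PySem.Int.mod year 400 = 0 then result + 366
        else if PySem.Int.mod year 100 = 0 then result + 365
        else if PySem.Int.mod year 4 = 0 then result + 366
        else result + 365) 0
    = 365 * n
      + ((a + n - 1) / 4 - (a - 1) / 4)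
      - ((a + n - 1) / 100 - (a - 1) / 100)
      + ((a + n - 1) / 400 - (a - 1) / 400) := by
  induction n with
  | zero =>
    rw [PySem.List.pyRange_one_eq_nil (by simp)]
    simp
  | succ n ih =>
    have h1 : a + (↑(n + 1) : Int) = (a + n) + 1 := by push_cast; ring
    rw [h1, PySem.List.pyRange_one_succ_right (by omega), List.foldl_append, ih]
    simp only [List.foldl_cons, List.foldl_nil,
      PySem.Int.mod_eq_emod_of_pos (show (0:Int) < 400 by norm_num),
      PySem.Int.mod_eq_emod_of_pos (show (0:Int) < 100 by norm_num),
      PySem.Int.mod_eq_emod_of_pos (show (0:Int) < 4 by norm_num)]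
    push_cast
    split_ifs <;> omega

theorem get_1000_year_eq_alt (a : Int) : get_1000_year a = get_1000_year_alt a := by
  unfold get_1000_year get_1000_year_alt pvCount
  have h : a + 1000 = a + ((1000 : Nat) : Int) := by norm_num
  rw [h, pvLoop_closed]
  simp only [PySem.Int.floordiv_eq_ediv_of_pos (show (0:Int) < 4 by norm_num),
    PySem.Int.floordiv_eq_ediv_of_pos (show (0:Int) < 100 by norm_num),
    PySem.Int.floordiv_eq_ediv_of_pos (show (0:Int) < 400 by norm_num)]
  push_cast
  omega

-- ===== VERDICT (by name: the statement is the Claim_ definition above) =====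
theorem get_1000_year_spec : Claim_equal_get_1000_year := by
  intro a _
  unfold Spec_get_1000_year
  exact get_1000_year_eq_alt a
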